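-- pv_equiv track=rewrite | github.com/LMP-dev/AdventOfCode | 2025/day_02/PuzzleB.py | divisors_without_1
-- ===== SOURCE A (Python) =====
-- import math
--
-- def divisors_without_1(num: int) -> set[int]:
--     """Calculates all the divisors of the number without considering 1"""
--     divisors: set[int] = set()
--     for i in range(2, int(math.sqrt(num)) + 1):
--         if num % i == 0:
--             divisors.add(i)
--             divisors.add(num // i)
--     divisors.add(num)
--     return divisors
-- ===== SOURCE B (Python) =====
-- def divisors_without_1(num: int) -> set[int]:
--     """Calculates all the divisors of the number without considering 1"""
--     divs = {1}
--     n = num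
--     p = 2
--     while p * p <= n:
--         if n % p == 0:
--             n //= p
--             divs |= {d * p for d in divs}
--         else:
--             p += 1
--     if n > 1:
--         divs |= {d * n for d in divs}
--     divs.discard(1)
--     divs.add(num)
--     return divs
-- ===== Notes on version B (the rewrite author's own statement) =====
-- stated objective: alternative
-- what changed: Replaces the sqrt(n)-bounded divisor-pairing loop (adding each small divisor i together with its cofactor num//i) by trial-division prime factorisation that peels off one prime factor at a time and builds the divisor set multiplicatively (divs |= {d*p for d in divs}).
import Mathlib
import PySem

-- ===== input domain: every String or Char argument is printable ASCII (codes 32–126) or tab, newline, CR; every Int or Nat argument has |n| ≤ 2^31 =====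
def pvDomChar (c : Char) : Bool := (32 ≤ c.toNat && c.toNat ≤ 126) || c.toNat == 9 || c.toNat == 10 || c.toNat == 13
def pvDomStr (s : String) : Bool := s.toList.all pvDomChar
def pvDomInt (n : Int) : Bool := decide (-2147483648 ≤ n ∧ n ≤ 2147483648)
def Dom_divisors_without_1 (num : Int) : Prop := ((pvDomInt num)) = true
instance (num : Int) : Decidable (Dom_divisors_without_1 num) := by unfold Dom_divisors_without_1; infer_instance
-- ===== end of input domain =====

-- B replaces A's √n-bounded divisor pairing (add each small divisor i and its cofactor num//i) by a
-- different algorithm: peel off prime factors by trial division and build the divisor set by products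
-- (alternative, same O(√n) cost). Python returns a set (no defined iteration order), so both ports
-- return the set's elements in ascending order as the canonical List Int representation.

-- ===== PORT A =====
-- int(math.sqrt(num)) = Int.sqrt num: exact for 0 ≤ num ≤ 2^31 (the Dom bound; the float sqrt of
-- such an int, truncated, is ⌊√num⌋). Negative num raises ValueError — excluded by Pre_.
def divisors_without_1 (num : Int) : List Int :=
  let divisors : PySem.Set Int :=
    (PySem.List.pyRange 2 (Int.sqrt num + 1) 1).foldl
      (fun s i =>
        if PySem.Int.mod num i = 0 then
          (s.add i).add (PySem.Int.floordiv num i)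
        else s)
      PySem.Set.empty
  PySem.List.sorted (divisors.add num) (fun x => x) false

-- ===== PORT B =====
-- the while-loop 'while p * p <= n: divide out p / p += 1' of Source B; the '1 < p' conjunct is only a
-- totality guard for the well-founded recursion (the caller always has p = 2, where it is true).
def altLoop (n p : Int) (divs : PySem.Set Int) : Int × PySem.Set Int :=
  if h : 1 < p ∧ p * p ≤ n then
    if PySem.Int.mod n p = 0 then
      altLoop (PySem.Int.floordiv n p) p (divs.union (divs.map (fun d => d * p)))
    else
      altLoop n (p + 1) divs
  else (n, divs)
termination_by (n - p).toNat
decreasing_by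
  · have h2 : (2:Int) ≤ p := by omega
    rw [PySem.Int.floordiv_eq_ediv_of_pos (by omega : (0:Int) < p)]
    have e1 : p * (n / p) + n % p = n := Int.mul_ediv_add_emod n p
    have e2 : 0 ≤ n % p := Int.emod_nonneg n (by omega : p ≠ 0)
    have hq2 : p ≤ n / p := by
      rw [Int.le_ediv_iff_mul_le (by omega : (0:Int) < p)]
      exact h.2
    have hq3 : n / p * 2 ≤ n / p * p := mul_le_mul_of_nonneg_left h2 (by omega : (0:Int) ≤ n / p)
    have e5 : n / p * p = p * (n / p) := mul_comm _ _
    omega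
  · have h2 : (2:Int) ≤ p := by omega
    have : p * 2 ≤ p * p := mul_le_mul_of_nonneg_left h2 (by omega : (0:Int) ≤ p)
    omega

def divisors_without_1_alt (num : Int) : List Int :=
  let r := altLoop num 2 (PySem.Set.ofList [1])
  let divs := if 1 < r.1 then r.2.union (r.2.map (fun d => d * r.1)) else r.2
  PySem.List.sorted ((PySem.Set.discard divs 1).add num) (fun x => x) false

-- ===== PRECONDITION & SPEC =====
-- A raises ValueError (math.sqrt of a negative) on negative inputs; exactly those are excluded.
def Pre_divisors_without_1 (num : Int) : Prop := 0 ≤ num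
instance (num : Int) : Decidable (Pre_divisors_without_1 num) := by unfold Pre_divisors_without_1; infer_instance
def pvWitness_divisors_without_1 : Int := (12)

def Spec_divisors_without_1 (num : Int) (out : List Int) : Prop := out = divisors_without_1_alt num
instance (num : Int) (out : List Int) : Decidable (Spec_divisors_without_1 num out) := by unfold Spec_divisors_without_1; infer_instance

-- ===== CLAIM (what is proved, stated in full; the proofs are below) =====
def Claim_equal_divisors_without_1 : Prop := ∀ (num : Int), Dom_divisors_without_1 num → Pre_divisors_without_1 num → Spec_divisors_without_1 num (divisors_without_1 num)

-- ===== LEMMAS AND PROOFS =====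

-- membership in A's divisor-collecting fold
theorem foldA_mem (num : Int) (l : List Int) (s : PySem.Set Int) (x : Int) :
    x ∈ l.foldl
      (fun s i =>
        if PySem.Int.mod num i = 0 then
          (PySem.Set.add (PySem.Set.add s i) (PySem.Int.floordiv num i))
        else s) s
    ↔ x ∈ s ∨ ∃ i ∈ l, PySem.Int.mod num i = 0 ∧ (x = i ∨ x = PySem.Int.floordiv num i) := by
  induction l generalizing s with
  | nil => simp
  | cons a t ih =>
    simp only [List.foldl_cons, ih]
    split_ifs with h
    · simp only [PySem.Set.mem_add, List.mem_cons]
      constructor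
      · rintro (((hx | hx) | hx) | ⟨i, hi, hm, hx⟩)
        · exact Or.inl hx
        · exact Or.inr ⟨a, Or.inl rfl, h, Or.inl hx⟩
        · exact Or.inr ⟨a, Or.inl rfl, h, Or.inr hx⟩
        · exact Or.inr ⟨i, Or.inr hi, hm, hx⟩
      · rintro (hx | ⟨i, (rfl | hi), hm, hx⟩)
        · exact Or.inl (Or.inl (Or.inl hx))
        · rcases hx with hx | hx
          · exact Or.inl (Or.inl (Or.inr hx))
          · exact Or.inl (Or.inr hx)
        · exact Or.inr ⟨i, hi, hm, hx⟩
    · simp only [List.mem_cons]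
      constructor
      · rintro (hx | ⟨i, hi, hm, hx⟩)
        · exact Or.inl hx
        · exact Or.inr ⟨i, Or.inr hi, hm, hx⟩
      · rintro (hx | ⟨i, (rfl | hi), hm, hx⟩)
        · exact Or.inl hx
        · exact absurd hm h
        · exact Or.inr ⟨i, hi, hm, hx⟩

-- A's fold preserves Nodup
theorem foldA_nodup (num : Int) (l : List Int) (s : PySem.Set Int) (hs : s.Nodup) :
    (l.foldl
      (fun s i =>
        if PySem.Int.mod num i = 0 then
          (PySem.Set.add (PySem.Set.add s i) (PySem.Int.floordiv num i))
        else s) s).Nodup := by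
  induction l generalizing s with
  | nil => exact hs
  | cons a t ih =>
    simp only [List.foldl_cons]
    split_ifs with h
    · exact ih _ (PySem.Set.nodup_add _ _ (PySem.Set.nodup_add _ _ hs))
    · exact ih _ hs

-- √-bound facts for Int.sqrt on a nonnegative argument
theorem int_sqrt_le (num : Int) (h : 0 ≤ num) : Int.sqrt num * Int.sqrt num ≤ num := by
  have h1 : Int.sqrt num = ((Nat.sqrt num.toNat : Nat) : Int) := rfl
  have h2 : ((num.toNat : Nat) : Int) = num := Int.toNat_of_nonneg h
  rw [h1, ← h2]
  exact_mod_cast Nat.sqrt_le num.toNat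

theorem int_lt_succ_sqrt (num : Int) (h : 0 ≤ num) : num < (Int.sqrt num + 1) * (Int.sqrt num + 1) := by
  have h1 : Int.sqrt num = ((Nat.sqrt num.toNat : Nat) : Int) := rfl
  have h2 : ((num.toNat : Nat) : Int) = num := Int.toNat_of_nonneg h
  rw [h1, ← h2]
  have := Nat.lt_succ_sqrt num.toNat
  push_cast [Nat.succ_eq_add_one] at *
  exact_mod_cast this

-- the number-theoretic core of the A side: √-bounded pairing collects exactly the divisors in [2, num]
theorem pairing_iff_scan (num x : Int) (hnum : 0 ≤ num) :
    ((∃ i, (2 ≤ i ∧ i < Int.sqrt num + 1) ∧ PySem.Int.mod num i = 0 ∧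
        (x = i ∨ x = PySem.Int.floordiv num i)) ∨ x = num)
    ↔ ((2 ≤ x ∧ x < num + 1 ∧ PySem.Int.mod num x = 0) ∨ x = num) := by
  have hs1 := int_sqrt_le num hnum
  have hs2 := int_lt_succ_sqrt num hnum
  have hs0 := Int.sqrt_nonneg num
  constructor
  · rintro (⟨i, ⟨h2i, hilt⟩, hm, hx⟩ | rfl)
    · rw [PySem.Int.mod_eq_zero_iff_dvd] at hm
      obtain ⟨c, hc⟩ := hm
      have hii : i * i ≤ num := by nlinarith
      have hic : i ≤ c := by nlinarith
      rcases hx with rfl | rfl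
      · exact Or.inl ⟨h2i, by nlinarith, by
          rw [PySem.Int.mod_eq_zero_iff_dvd]; exact ⟨c, hc⟩⟩
      · have hfd : PySem.Int.floordiv num i = c := by
          rw [PySem.Int.floordiv_eq_ediv_of_pos (by omega : (0:Int) < i), hc,
            Int.mul_ediv_cancel_left c (by omega : i ≠ 0)]
        rw [hfd]
        exact Or.inl ⟨by omega, by nlinarith, by
          rw [PySem.Int.mod_eq_zero_iff_dvd]; exact ⟨i, by rw [hc]; ring⟩⟩
    · exact Or.inr rfl
  · rintro (⟨h2x, hxlt, hm⟩ | rfl)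
    · rw [PySem.Int.mod_eq_zero_iff_dvd] at hm
      by_cases hxn : x = num
      · exact Or.inr hxn
      left
      obtain ⟨c, hc⟩ := hm
      have hc2 : 2 ≤ c := by
        rcases (by omega : c = 1 ∨ c ≤ 0 ∨ 2 ≤ c) with rfl | hc0 | hc2
        · exact absurd (by omega : x = num) hxn
        · nlinarith
        · exact hc2
      by_cases hxs : x ≤ Int.sqrt num
      · exact ⟨x, ⟨h2x, by omega⟩, by
          rw [PySem.Int.mod_eq_zero_iff_dvd]; exact ⟨c, hc⟩, Or.inl rfl⟩
      · rw [not_le] at hxs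
        have hcs : c ≤ Int.sqrt num := by nlinarith
        refine ⟨c, ⟨hc2, by omega⟩, by
          rw [PySem.Int.mod_eq_zero_iff_dvd]; exact ⟨x, by rw [hc]; ring⟩, Or.inr ?_⟩
        rw [PySem.Int.floordiv_eq_ediv_of_pos (by omega : (0:Int) < c), hc, mul_comm,
          Int.mul_ediv_cancel_left x (by omega : c ≠ 0)]
    · exact Or.inr rfl

-- p is prime when it divides an n that has no divisor in [2, p)
theorem prime_of_min_factor (p n : Int) (h2 : 2 ≤ p) (hpn : p ∣ n)
    (hsm : ∀ q : Int, 2 ≤ q → q < p → ¬ q ∣ n) : Prime p := by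
  rw [Int.prime_iff_natAbs_prime]
  rw [Nat.prime_def_lt]
  refine ⟨by omega, fun m hm hmp => ?_⟩
  by_contra hm1
  have hm0 : m ≠ 0 := by
    rintro rfl
    simp only [Nat.zero_dvd, Int.natAbs_eq_zero] at hmp
    omega
  have habs : p.natAbs = p.toNat := by omega
  have hmd : (m : Int) ∣ p := by
    have : (m : Int) ∣ (p.natAbs : Int) := Int.natCast_dvd_natCast.mpr hmp
    rwa [Int.natAbs_of_nonneg (by omega : (0:Int) ≤ p)] at this
  exact hsm (m : Int) (by omega) (by omega) (hmd.trans hpn)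

-- n is prime when every divisor q ≥ 2 of n exceeds its square root
theorem prime_of_all_factors_large (n : Int) (h2 : 2 ≤ n)
    (hf : ∀ q : Int, 2 ≤ q → q ∣ n → n < q * q) : Prime n := by
  rw [Int.prime_iff_natAbs_prime, Nat.prime_def_lt]
  refine ⟨by omega, fun m hm hmp => ?_⟩
  by_contra hm1
  have hm0 : m ≠ 0 := by
    rintro rfl
    simp only [Nat.zero_dvd, Int.natAbs_eq_zero] at hmp
    omega
  have hmd : (m : Int) ∣ n := by
    have : (m : Int) ∣ (n.natAbs : Int) := Int.natCast_dvd_natCast.mpr hmp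
    rwa [Int.natAbs_of_nonneg (by omega : (0:Int) ≤ n)] at this
  obtain ⟨t, ht⟩ := hmd
  have htm : t ∣ n := ⟨m, by rw [ht]; ring⟩
  have hmlt : (m : Int) < n := by omega
  have ht2 : 2 ≤ t := by
    rcases (by omega : t ≤ 0 ∨ t = 1 ∨ 2 ≤ t) with h | h | h
    · nlinarith
    · rw [h, mul_one] at ht; omega
    · exact h
  have h1 := hf (m : Int) (by omega) ⟨t, ht⟩
  have h2' := hf t ht2 htm
  nlinarith

-- multiplying the divisor set of m by a fresh prime p gives the divisor set of m * p
theorem prime_step (p m : Int) (divs : PySem.Set Int) (hp : Prime p) (hppos : 0 < p)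
    (hmem : ∀ x : Int, x ∈ divs ↔ x ∣ m ∧ 0 < x) :
    ∀ x : Int, x ∈ divs.union (divs.map (fun d => d * p)) ↔ x ∣ m * p ∧ 0 < x := by
  intro x
  rw [PySem.Set.mem_union]
  constructor
  · rintro (hx | hx)
    · rcases (hmem x).mp hx with ⟨hd, hx0⟩
      exact ⟨dvd_mul_of_dvd_left hd p, hx0⟩
    · obtain ⟨d, hd, rfl⟩ := List.mem_map.mp hx
      rcases (hmem d).mp hd with ⟨hdm, hd0⟩
      exact ⟨mul_dvd_mul hdm dvd_rfl, mul_pos hd0 hppos⟩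
  · rintro ⟨hdvd, hx0⟩
    by_cases hpx : p ∣ x
    · right
      obtain ⟨y, rfl⟩ := hpx
      have hy : y ∣ m := by
        rw [mul_comm m p] at hdvd
        exact (mul_dvd_mul_iff_left hp.ne_zero).mp hdvd
      have hy0 : 0 < y := by nlinarith
      exact List.mem_map.mpr ⟨y, (hmem y).mpr ⟨hy, hy0⟩, mul_comm y p⟩
    · left
      exact (hmem x).mpr ⟨((Prime.coprime_iff_not_dvd hp).mpr hpx).symm.dvd_of_dvd_mul_right hdvd, hx0⟩

-- loop invariant of B's factorisation loop: divs stays the positive divisor set of the peeled-off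
-- part m, n keeps no factor below p, and at exit every divisor of n exceeds √n
theorem altLoop_spec (n p : Int) (divs : PySem.Set Int) :
    ∀ (m : Int), 0 < n → 2 ≤ p → 0 < m →
    (∀ q : Int, 2 ≤ q → q < p → ¬ q ∣ n) → divs.Nodup →
    (∀ x : Int, x ∈ divs ↔ x ∣ m ∧ 0 < x) →
    (altLoop n p divs).2.Nodup ∧ 0 < (altLoop n p divs).1 ∧
    ∃ m', 0 < m' ∧ m' * (altLoop n p divs).1 = m * n ∧
      (∀ x : Int, x ∈ (altLoop n p divs).2 ↔ x ∣ m' ∧ 0 < x) ∧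
      (∀ q : Int, 2 ≤ q → q ∣ (altLoop n p divs).1 → (altLoop n p divs).1 < q * q) := by
  induction n, p, divs using altLoop.induct with
  | case1 n p divs h hmod ih =>
    intro m hn hp hm hsm hnd hmem
    simp only [List.map_subtype, List.unattach_attach] at ih
    rw [altLoop, dif_pos h, if_pos hmod]
    have hpd : p ∣ n := (PySem.Int.mod_eq_zero_iff_dvd n p).mp hmod
    have hprime : Prime p := prime_of_min_factor p n hp hpd hsm
    have hfd : PySem.Int.floordiv n p = n / p := PySem.Int.floordiv_eq_ediv_of_pos (by omega)
    have hcancel : n / p * p = n := Int.ediv_mul_cancel hpd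
    have hq0 : 0 < n / p := by
      rcases (by omega : n / p ≤ 0 ∨ 0 < n / p) with h0 | h0
      · nlinarith
      · exact h0
    have hdvd' : n / p ∣ n := ⟨p, hcancel.symm⟩
    rw [hfd] at ih ⊢
    obtain ⟨c1, c2, m'', hm'', heq, hmem'', hq''⟩ :=
      ih (m * p) hq0 hp (mul_pos hm (by omega))
        (fun q hq2 hqp hqd => hsm q hq2 hqp (dvd_trans hqd hdvd'))
        (PySem.Set.nodup_union _ _ hnd)
        (prime_step p m divs hprime (by omega) hmem)
    refine ⟨c1, c2, m'', hm'', ?_, hmem'', hq''⟩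
    rw [heq, mul_assoc, mul_comm p (n / p), hcancel]
  | case2 n p divs h hmod ih =>
    intro m hn hp hm hsm hnd hmem
    rw [altLoop, dif_pos h, if_neg hmod]
    have hnp : ¬ p ∣ n := fun hd => hmod ((PySem.Int.mod_eq_zero_iff_dvd n p).mpr hd)
    exact ih m hn (by omega) hm
      (fun q hq2 hqp hqd => by
        rcases (by omega : q < p ∨ q = p) with h' | rfl
        · exact hsm q hq2 h' hqd
        · exact hnp hqd)
      hnd hmem
  | case3 n p divs h =>
    intro m hn hp hm hsm hnd hmem
    rw [altLoop, dif_neg h]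
    have hlt : n < p * p := by
      by_contra hc
      exact h ⟨by omega, by omega⟩
    refine ⟨hnd, hn, m, hm, rfl, hmem, fun q hq2 hqd => ?_⟩
    rcases (by omega : q < p ∨ p ≤ q) with h' | h'
    · exact absurd hqd (hsm q hq2 h')
    · nlinarith

-- B's assembled set before discard/add is the positive divisor set of num (num ≥ 1)
theorem alt_divs_spec (num : Int) (h1 : 1 ≤ num) :
    (if 1 < (altLoop num 2 (PySem.Set.ofList [1])).1 then
        (altLoop num 2 (PySem.Set.ofList [1])).2.union
          ((altLoop num 2 (PySem.Set.ofList [1])).2.map (fun d => d * (altLoop num 2 (PySem.Set.ofList [1])).1))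
      else (altLoop num 2 (PySem.Set.ofList [1])).2).Nodup ∧
    ∀ x : Int, (x ∈ (if 1 < (altLoop num 2 (PySem.Set.ofList [1])).1 then
        (altLoop num 2 (PySem.Set.ofList [1])).2.union
          ((altLoop num 2 (PySem.Set.ofList [1])).2.map (fun d => d * (altLoop num 2 (PySem.Set.ofList [1])).1))
      else (altLoop num 2 (PySem.Set.ofList [1])).2)) ↔ x ∣ num ∧ 0 < x := by
  have hbase : ∀ x : Int, x ∈ PySem.Set.ofList [1] ↔ x ∣ 1 ∧ 0 < x := by
    intro x
    rw [PySem.Set.mem_ofList]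
    simp only [List.mem_singleton]
    constructor
    · rintro rfl; exact ⟨dvd_rfl, one_pos⟩
    · rintro ⟨hd, h0⟩
      rcases Int.isUnit_iff.mp (isUnit_of_dvd_one hd) with rfl | rfl
      · rfl
      · omega
  obtain ⟨hnd, hn0, m', hm0, hmn, hmem, hq⟩ :=
    altLoop_spec num 2 (PySem.Set.ofList [1]) 1 (by omega) le_rfl one_pos
      (fun q _ hqp _ => by omega) (PySem.Set.nodup_ofList _) hbase
  by_cases hbig : 1 < (altLoop num 2 (PySem.Set.ofList [1])).1
  · rw [if_pos hbig]
    have hprime : Prime (altLoop num 2 (PySem.Set.ofList [1])).1 :=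
      prime_of_all_factors_large _ (by omega) hq
    refine ⟨PySem.Set.nodup_union _ _ hnd, fun x => ?_⟩
    rw [prime_step _ m' _ hprime (by omega) hmem x, hmn, one_mul]
  · rw [if_neg hbig]
    have : (altLoop num 2 (PySem.Set.ofList [1])).1 = 1 := by omega
    rw [this, mul_one] at hmn
    refine ⟨hnd, fun x => ?_⟩
    rw [hmem x, hmn, one_mul]

-- both ports sort a Nodup list; list equality follows from equal membership
theorem sorted_eq_of_mem_iff (xs ys : List Int) (hx : xs.Nodup) (hy : ys.Nodup)
    (h : ∀ a : Int, a ∈ xs ↔ a ∈ ys) :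
    PySem.List.sorted xs (fun x => x) false = PySem.List.sorted ys (fun x => x) false :=
  PySem.List.sorted_eq_sorted_of_perm _ _ _ (fun _ _ h => h)
    ((List.perm_ext_iff_of_nodup hx hy).mpr h)

theorem divisors_without_1_spec : Claim_equal_divisors_without_1 := by
  intro num _ hpre
  show divisors_without_1 num = divisors_without_1_alt num
  have h0 : (0:Int) ≤ num := hpre
  unfold divisors_without_1 divisors_without_1_alt
  rcases (by omega : num = 0 ∨ 1 ≤ num) with rfl | h1
  · -- degenerate case: both the range and the loop are empty and both sides are a singleton
    rw [show Int.sqrt 0 + 1 = 1 by norm_num [Int.sqrt],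
      PySem.List.pyRange_one_eq_nil (by omega)]
    rw [show altLoop 0 2 (PySem.Set.ofList [1]) = (0, PySem.Set.ofList [1]) by
      rw [altLoop]; norm_num]
    decide
  · apply sorted_eq_of_mem_iff
    · exact PySem.Set.nodup_add _ _ (foldA_nodup num _ PySem.Set.empty (by simp [PySem.Set.empty]))
    · exact PySem.Set.nodup_add _ _ (PySem.Set.nodup_discard _ _ (alt_divs_spec num h1).1)
    intro x
    rw [PySem.Set.mem_add, foldA_mem, PySem.Set.mem_add, PySem.Set.mem_discard,
      (alt_divs_spec num h1).2 x]
    simp only [PySem.List.mem_pyRange_one, PySem.Set.empty, List.not_mem_nil, false_or]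
    have hA := pairing_iff_scan num x (by omega)
    constructor
    · intro h
      rcases hA.mp (h.imp (fun ⟨i, hi, hm', hx⟩ => ⟨i, ⟨hi.1, hi.2⟩, hm', hx⟩) id) with
        ⟨h2x, hxlt, hmx⟩ | hx
      · rw [PySem.Int.mod_eq_zero_iff_dvd] at hmx
        exact Or.inl ⟨⟨hmx, by omega⟩, by omega⟩
      · exact Or.inr hx
    · intro h
      apply (fun h' => (hA.mpr h').imp (fun ⟨i, hi, hm', hx⟩ => ⟨i, ⟨hi.1, hi.2⟩, hm', hx⟩) id)
      rcases h with ⟨⟨hd, h0⟩, hne⟩ | hx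
      · have hle : x ≤ num := Int.le_of_dvd (by omega) hd
        exact Or.inl ⟨by omega, by omega, (PySem.Int.mod_eq_zero_iff_dvd num x).mpr hd⟩
      · exact Or.inr hx

-- ===== VERDICT (by name: the statement is the Claim_ definition above) =====
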